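-- pv_equiv track=rewrite | github.com/weiss-gal/chunka_bank | cb_server/crontab.py | _set_to_string
-- ===== SOURCE A (Python) =====
-- from typing import List, Set
--
-- def _set_to_string(values_set: Set[int], min_value: int, max_value: int) -> str:
--     if len(values_set) == max_value - min_value + 1:
--         return '*'
--
--     # convert consecutive values to ranges
--     parts = []
--     part_start = None
--     part_end = None
--     l = list(values_set)
--     l.sort()
--     for item in l:
--         if part_start is None:
--             part_start = item
--             part_end = item
--         elif item != part_end + 1:
--             if part_start == part_end:
--                 parts.append(str(part_start))
--             else:
--                 parts.append(f"{part_start}-{part_end}")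
--             part_start = item
--             part_end = item
--         else:
--             part_end = item
--
--     if part_start is not None:
--         if part_start == part_end:
--             parts.append(str(part_start))
--         else:
--             parts.append(f"{part_start}-{part_end}")
--
--     return ','.join([part for part in parts])
-- ===== SOURCE B (Python) =====
-- def _set_to_string(values_set, min_value: int, max_value: int) -> str:
--     if len(values_set) == max_value - min_value + 1:
--         return '*'
--     # boundary detection by set membership: v starts a run iff v-1 is absent,
--     # v ends a run iff v+1 is absent; the k-th start pairs with the k-th end.
--     starts = sorted(v for v in values_set if v - 1 not in values_set)
--     ends = sorted(v for v in values_set if v + 1 not in values_set)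
--     return ','.join(str(a) if a == b else f"{a}-{b}" for a, b in zip(starts, ends))
-- ===== Notes on version B (the rewrite author's own statement) =====
-- stated objective: alternative
-- what changed: Replaces A's sort-then-scan run state machine by membership-based boundary detection: an element starts a run iff value-1 is not in the set and ends one iff value+1 is not, and the sorted starts are zipped with the sorted ends.
import Mathlib
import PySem

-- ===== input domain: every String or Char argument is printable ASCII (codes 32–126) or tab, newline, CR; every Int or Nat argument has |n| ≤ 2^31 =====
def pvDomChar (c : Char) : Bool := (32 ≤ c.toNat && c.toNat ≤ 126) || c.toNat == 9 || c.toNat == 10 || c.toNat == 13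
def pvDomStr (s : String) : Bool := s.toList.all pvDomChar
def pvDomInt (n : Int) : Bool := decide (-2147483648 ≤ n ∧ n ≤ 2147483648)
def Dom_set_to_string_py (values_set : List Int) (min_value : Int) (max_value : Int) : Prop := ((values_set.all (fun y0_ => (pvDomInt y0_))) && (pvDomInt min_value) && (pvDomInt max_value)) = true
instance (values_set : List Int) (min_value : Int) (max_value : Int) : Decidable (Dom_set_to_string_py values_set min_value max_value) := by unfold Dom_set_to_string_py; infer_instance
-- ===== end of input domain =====

-- B drops A's run state machine: it finds run boundaries by set membership
-- (v starts a run iff v-1 is absent, ends one iff v+1 is absent) and zips the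
-- sorted starts with the sorted ends (objective: alternative).

-- ===== PORT A =====
-- the repeated `str(part_start)` / f"{part_start}-{part_end}" block of A
def pvFmtA (s e : Int) : String :=
  if s = e then PySem.Int.toStr s else PySem.Int.toStr s ++ "-" ++ PySem.Int.toStr e

-- Python keeps part_start/part_end as two Optionals that are None together; ported as one Option (Int × Int)
def pvStepA (acc : List String × Option (Int × Int)) (item : Int) : List String × Option (Int × Int) :=
  match acc.2 with
  | none => (acc.1, some (item, item))
  | some (ps, pe) =>
    if item ≠ pe + 1 then (acc.1 ++ [pvFmtA ps pe], some (item, item))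
    else (acc.1, some (ps, item))

-- the final 'if part_start is not None' flush
def pvFlushA (fin : List String × Option (Int × Int)) : List String :=
  match fin.2 with
  | none => fin.1
  | some (ps, pe) => fin.1 ++ [pvFmtA ps pe]

def set_to_string_py (values_set : List Int) (min_value : Int) (max_value : Int) : String :=
  if (values_set.length : Int) = max_value - min_value + 1 then "*"
  else
    let l := PySem.List.sorted values_set (fun x => x) false
    PySem.Str.join "," (pvFlushA (l.foldl pvStepA ([], none)))

-- ===== PORT B =====
def set_to_string_py_alt (values_set : List Int) (min_value : Int) (max_value : Int) : String :=
  if (values_set.length : Int) = max_value - min_value + 1 then "*"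
  else
    let starts := PySem.List.sorted (values_set.filter (fun v => !(values_set.contains (v - 1)))) (fun x => x) false
    let ends := PySem.List.sorted (values_set.filter (fun v => !(values_set.contains (v + 1)))) (fun x => x) false
    PySem.Str.join "," ((starts.zip ends).map
      (fun p => if p.1 = p.2 then PySem.Int.toStr p.1 else PySem.Int.toStr p.1 ++ "-" ++ PySem.Int.toStr p.2))

-- ===== PRECONDITION & SPEC =====
-- Pre_ requires distinct elements only: the Python parameter is a set, and under the
-- set→List convention the list holds its distinct elements, so a duplicate list
-- represents no Python input.
def Pre_set_to_string_py (values_set : List Int) (min_value : Int) (max_value : Int) : Prop :=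
  values_set.Nodup
instance (values_set : List Int) (min_value : Int) (max_value : Int) : Decidable (Pre_set_to_string_py values_set min_value max_value) := by unfold Pre_set_to_string_py; infer_instance

def pvWitness_set_to_string_py : List Int × Int × Int := ([5, 1, 2], 0, 9)

def Spec_set_to_string_py (values_set : List Int) (min_value : Int) (max_value : Int) (out : String) : Prop := out = set_to_string_py_alt values_set min_value max_value
instance (values_set : List Int) (min_value : Int) (max_value : Int) (out : String) : Decidable (Spec_set_to_string_py values_set min_value max_value out) := by unfold Spec_set_to_string_py; infer_instance

-- ===== CLAIM =====
def Claim_equal_set_to_string_py : Prop := ∀ (values_set : List Int) (min_value : Int) (max_value : Int), Dom_set_to_string_py values_set min_value max_value → Pre_set_to_string_py values_set min_value max_value → Spec_set_to_string_py values_set min_value max_value (set_to_string_py values_set min_value max_value)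

-- ===== LEMMAS AND PROOFS =====

-- canonical run formatter A's loop is reduced to
def pvRunsFmt (s e : Int) : List Int → List String
  | [] => [pvFmtA s e]
  | v :: vs => if v = e + 1 then pvRunsFmt s v vs else pvFmtA s e :: pvRunsFmt v v vs

theorem pvStep_loop (vs : List Int) : ∀ (parts : List String) (s e : Int),
    pvFlushA (vs.foldl pvStepA (parts, some (s, e))) = parts ++ pvRunsFmt s e vs := by
  induction vs with
  | nil => intro parts s e; simp [pvFlushA, pvRunsFmt]
  | cons v vs ih =>
    intro parts s e
    rw [List.foldl_cons]
    by_cases h : v = e + 1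
    · have hstep : pvStepA (parts, some (s, e)) v = (parts, some (s, v)) := by
        simp [pvStepA, h]
      rw [hstep, ih, h, pvRunsFmt, if_pos rfl]
    · have hstep : pvStepA (parts, some (s, e)) v = (parts ++ [pvFmtA s e], some (v, v)) := by
        simp [pvStepA, h]
      rw [hstep, ih, pvRunsFmt, if_neg h, List.append_assoc, List.singleton_append]

-- run starts strictly after a previous element e (chain form)
def pvGoS (e : Int) : List Int → List Int
  | [] => []
  | w :: ws => if w = e + 1 then pvGoS w ws else w :: pvGoS w ws

-- run ends, e being the previous (still open) element
def pvGoE (e : Int) : List Int → List Int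
  | [] => [e]
  | w :: ws => if w = e + 1 then pvGoE w ws else e :: pvGoE w ws

theorem pvRunsFmt_zip (vs : List Int) : ∀ (st e : Int),
    pvRunsFmt st e vs = ((st :: pvGoS e vs).zip (pvGoE e vs)).map (fun p => pvFmtA p.1 p.2) := by
  induction vs with
  | nil => intro st e; simp [pvRunsFmt, pvGoS, pvGoE]
  | cons w ws ih =>
    intro st e
    by_cases h : w = e + 1
    · simp only [pvRunsFmt, pvGoS, pvGoE, if_pos h, ih]
    · simp only [pvRunsFmt, pvGoS, pvGoE, if_neg h, ih, List.zip_cons_cons, List.map_cons]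

theorem pvFilterS (vs : List Int) : ∀ (e : Int), (e :: vs).Pairwise (· < ·) →
    vs.filter (fun x => !(decide ((x - 1) ∈ (e :: vs)))) = pvGoS e vs := by
  induction vs with
  | nil => intro e _; simp [pvGoS]
  | cons w ws ih =>
    intro e hp
    have he_w : e < w := (List.pairwise_cons.mp hp).1 w (List.mem_cons_self ..)
    have hw_ws : ∀ x ∈ ws, w < x :=
      (List.pairwise_cons.mp (List.pairwise_cons.mp hp).2).1
    have hmem : (w - 1) ∈ (e :: w :: ws) ↔ w = e + 1 := by
      simp only [List.mem_cons]
      constructor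
      · rintro (h1 | h1 | h1)
        · omega
        · omega
        · exact absurd (hw_ws _ h1) (by omega)
      · intro h; exact Or.inl (by omega)
    have hd1 : decide ((w - 1) ∈ (e :: w :: ws)) = decide (w = e + 1) := by
      simp only [decide_eq_decide]; exact hmem
    have htail : ws.filter (fun x => !(decide ((x - 1) ∈ (e :: w :: ws)))) =
        ws.filter (fun x => !(decide ((x - 1) ∈ (w :: ws)))) := by
      apply List.filter_congr
      intro x hx
      have hx' : w < x := hw_ws x hx
      have hiff : ((x - 1) ∈ (e :: w :: ws)) ↔ ((x - 1) ∈ (w :: ws)) := by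
        have hne : ¬ (x - 1 = e) := by omega
        simp only [List.mem_cons]
        constructor
        · rintro (h1 | h1)
          · omega
          · exact h1
        · intro h1; exact Or.inr h1
      rw [show decide _ = decide _ from by simp only [decide_eq_decide]; exact hiff]
    have hp' : (w :: ws).Pairwise (· < ·) := (List.pairwise_cons.mp hp).2
    rw [List.filter_cons, hd1, htail, ih w hp']
    by_cases h : w = e + 1
    · simp [pvGoS, h]
    · simp [pvGoS, h]

theorem pvFilterE (vs : List Int) : ∀ (e : Int), (e :: vs).Pairwise (· < ·) →
    (e :: vs).filter (fun x => !(decide ((x + 1) ∈ (e :: vs)))) = pvGoE e vs := by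
  induction vs with
  | nil =>
    intro e _
    have hne : ¬ ((e + 1) ∈ ([e] : List Int)) := by
      simp only [List.mem_cons, List.not_mem_nil, or_false]; omega
    simp [pvGoE]

  | cons w ws ih =>
    intro e hp
    have he_w : e < w := (List.pairwise_cons.mp hp).1 w (List.mem_cons_self ..)
    have hw_ws : ∀ x ∈ ws, w < x :=
      (List.pairwise_cons.mp (List.pairwise_cons.mp hp).2).1
    have hmem : (e + 1) ∈ (e :: w :: ws) ↔ w = e + 1 := by
      simp only [List.mem_cons]
      constructor
      · rintro (h1 | h1 | h1)
        · omega
        · omega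
        · exact absurd (hw_ws _ h1) (by omega)
      · intro h; exact Or.inr (Or.inl h.symm)
    have hd1 : decide ((e + 1) ∈ (e :: w :: ws)) = decide (w = e + 1) := by
      simp only [decide_eq_decide]; exact hmem
    have htail : (w :: ws).filter (fun x => !(decide ((x + 1) ∈ (e :: w :: ws)))) =
        (w :: ws).filter (fun x => !(decide ((x + 1) ∈ (w :: ws)))) := by
      apply List.filter_congr
      intro x hx
      have hx' : w ≤ x := by
        rcases List.mem_cons.mp hx with h1 | h1
        · omega
        · exact le_of_lt (hw_ws x h1)
      have hiff : ((x + 1) ∈ (e :: w :: ws)) ↔ ((x + 1) ∈ (w :: ws)) := by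
        have hne : ¬ (x + 1 = e) := by omega
        simp only [List.mem_cons]
        constructor
        · rintro (h1 | h1)
          · omega
          · exact h1
        · intro h1; exact Or.inr h1
      rw [show decide _ = decide _ from by simp only [decide_eq_decide]; exact hiff]
    have hp' : (w :: ws).Pairwise (· < ·) := (List.pairwise_cons.mp hp).2
    rw [show ((e :: w :: ws).filter (fun x => !(decide ((x + 1) ∈ (e :: w :: ws))))) =
        (if (!(decide ((e + 1) ∈ (e :: w :: ws)))) = true then
          e :: ((w :: ws).filter (fun x => !(decide ((x + 1) ∈ (e :: w :: ws)))))
        else ((w :: ws).filter (fun x => !(decide ((x + 1) ∈ (e :: w :: ws)))))) from List.filter_cons ..,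
      hd1, htail, ih w hp']
    by_cases h : w = e + 1
    · simp [pvGoE, h]
    · simp [pvGoE, h]

-- sorting the filtered set = filtering the sorted set (membership-only predicate)
theorem pvSortFilter (values_set : List Int) (f : Int → Int)
    (hs : (PySem.List.sorted values_set (fun x => x) false).Pairwise (· < ·)) :
    PySem.List.sorted (values_set.filter (fun v => !(values_set.contains (f v)))) (fun x => x) false =
      (PySem.List.sorted values_set (fun x => x) false).filter
        (fun v => !(decide ((f v) ∈ PySem.List.sorted values_set (fun x => x) false))) := by
  set s := PySem.List.sorted values_set (fun x => x) false with hsdef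
  have hperm : s.Perm values_set := PySem.List.sorted_perm ..
  have hfuneq : (fun v => !(values_set.contains (f v))) = (fun v => !(decide ((f v) ∈ s))) := by
    funext v
    have hm : (f v ∈ values_set) = (f v ∈ s) := propext hperm.mem_iff.symm
    simp only [List.contains_eq_mem, hm]
  apply PySem.List.sorted_eq_of_perm_of_pairwise_lt
  · rw [hfuneq]
    exact hperm.filter _
  · exact hs.sublist List.filter_sublist

theorem pvSortedLt (values_set : List Int) (hnd : values_set.Nodup) :
    (PySem.List.sorted values_set (fun x => x) false).Pairwise (· < ·) := by
  have hle : (PySem.List.sorted values_set (fun x => x) false).Pairwise (· ≤ ·) := by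
    have := PySem.List.sorted_pairwise values_set (fun x => x)
    simpa using this
  have hnd' : (PySem.List.sorted values_set (fun x => x) false).Nodup :=
    ((PySem.List.sorted_perm ..).nodup_iff).mpr hnd
  exact (hle.and hnd').imp (fun h => lt_of_le_of_ne h.1 h.2)

-- ===== VERDICT =====
theorem set_to_string_py_spec : Claim_equal_set_to_string_py := by
  intro values_set min_value max_value _ hnd
  unfold Spec_set_to_string_py set_to_string_py set_to_string_py_alt
  by_cases hg : (values_set.length : Int) = max_value - min_value + 1
  · simp [hg]
  · simp only [hg, if_false]
    have hs := pvSortedLt values_set hnd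
    rw [pvSortFilter values_set (fun v => v - 1) hs, pvSortFilter values_set (fun v => v + 1) hs]
    set s := PySem.List.sorted values_set (fun x => x) false with hsdef
    cases hsc : s with
    | nil => simp [pvFlushA, PySem.Str.join]
    | cons v vs =>
      rw [hsc] at hs
      have hstep0 : pvStepA ([], none) v = ([], some (v, v)) := by simp [pvStepA]
      have hA : pvFlushA ((v :: vs).foldl pvStepA ([], none)) = pvRunsFmt v v vs := by
        rw [List.foldl_cons, hstep0, pvStep_loop]
        simp
      have hhead : ¬ ((v - 1) ∈ (v :: vs)) := by
        intro hm
        rcases List.mem_cons.mp hm with h1 | h1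
        · omega
        · exact absurd ((List.pairwise_cons.mp hs).1 _ h1) (by omega)
      have hstarts : (v :: vs).filter (fun x => !(decide ((x - 1) ∈ (v :: vs)))) = v :: pvGoS v vs := by
        have hd0 : decide ((v - 1) ∈ (v :: vs)) = false := by
          simp only [decide_eq_false_iff_not]; exact hhead
        rw [List.filter_cons, hd0]
        simp only [Bool.not_false, if_true]
        rw [pvFilterS vs v hs]
      have hends := pvFilterE vs v hs
      rw [hA, hstarts, hends, pvRunsFmt_zip]
      rfl
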